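-- pv_equiv track=rewrite | github.com/icicle-emu/fuzzware-emulator | harness/fuzzware_harness/util.py | closest_symbol
-- ===== SOURCE A (Python) =====
-- def closest_symbol(addr_to_name, addr, max_offset=0x1000):
--     """
--     Find the symbol which is closest to addr, alongside with its offset.
--
--     Returns:
--         - (symbol_name, offset_to_symbol) if a symbol exists with an offset of a maximum of max_offset
--         - Otherwise, (None, None) is returned in case no symbol with appropriate offset exists
--     """
--     if not addr_to_name:
--         return (None, None)
--
--     sorted_addrs = sorted(addr_to_name)
--     for i, sym_addr in enumerate(sorted_addrs):
--         # last entry?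
--         if i == len(sorted_addrs) - 1 or sorted_addrs[i+1] > addr:
--             off = addr - sym_addr
--             if 0 <= off <= max_offset:
--                 return addr_to_name[sym_addr], off
--             return (None, None)
--     return (None, None)
-- ===== SOURCE B (Python) =====
-- def closest_symbol(addr_to_name, addr, max_offset=0x1000):
--     """Binary search (hand-rolled bisect_right) over the sorted symbol
--     addresses instead of a linear scan for the successor."""
--     if not addr_to_name:
--         return (None, None)
--     sorted_addrs = sorted(addr_to_name)
--     # bisect_right: lo ends up at the number of addresses <= addr
--     lo, hi = 0, len(sorted_addrs)
--     while lo < hi: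
--         mid = (lo + hi) // 2
--         if addr < sorted_addrs[mid]:
--             hi = mid
--         else:
--             lo = mid + 1
--     if lo == 0:
--         # every symbol address is above addr
--         return (None, None)
--     sym_addr = sorted_addrs[lo - 1]
--     off = addr - sym_addr  # >= 0 by construction
--     if off <= max_offset:
--         return (addr_to_name[sym_addr], off)
--     return (None, None)
-- ===== Notes on version B (the rewrite author's own statement) =====
-- stated objective: alternative
-- what changed: Replaces A's linear enumerate-scan for the first sorted address whose successor exceeds addr with a hand-rolled bisect_right binary search on the sorted address list, reading off the predecessor directly (the 0 <= off test becomes the i == 0 guard).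
import Mathlib
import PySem

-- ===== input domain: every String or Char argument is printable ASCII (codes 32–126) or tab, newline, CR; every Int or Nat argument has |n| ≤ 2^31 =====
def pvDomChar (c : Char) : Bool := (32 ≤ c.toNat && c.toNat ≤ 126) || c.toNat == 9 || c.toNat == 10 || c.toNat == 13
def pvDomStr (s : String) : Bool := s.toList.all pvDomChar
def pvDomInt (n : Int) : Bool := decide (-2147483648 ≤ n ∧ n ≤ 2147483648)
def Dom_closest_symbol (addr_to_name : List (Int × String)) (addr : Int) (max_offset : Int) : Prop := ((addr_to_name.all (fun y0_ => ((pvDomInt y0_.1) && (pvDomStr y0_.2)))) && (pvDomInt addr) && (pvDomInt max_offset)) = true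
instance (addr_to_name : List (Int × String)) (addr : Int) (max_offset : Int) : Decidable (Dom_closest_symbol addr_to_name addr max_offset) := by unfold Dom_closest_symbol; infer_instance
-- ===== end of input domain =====

-- B replaces A's linear scan over the sorted symbol addresses by a binary search (bisect_right) for addr's insertion point.


-- ===== PORT A =====
def checkA (d : PySem.Dict Int String) (addr max_offset sym_addr : Int) :
    Option String × Option Int :=
  let off := addr - sym_addr
  if 0 ≤ off ∧ off ≤ max_offset then (d.get? sym_addr, some off) else (none, none)

-- the 'for i, sym_addr in enumerate(sorted_addrs)' loop with its lookahead test
-- 'i == len(sorted_addrs) - 1 or sorted_addrs[i+1] > addr', as the structural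
-- recursion over the list: the lookahead 'sorted_addrs[i+1]' is the next
-- element, 'i == len - 1' is 'no next element'.  'addr_to_name[sym_addr]' is
-- dict lookup of a present key, hence 'd.get? sym_addr' (= some of that value).
def scanA (d : PySem.Dict Int String) (addr max_offset : Int) :
    List Int → Option String × Option Int
  | [] => (none, none)
  | [sym_addr] => checkA d addr max_offset sym_addr
  | sym_addr :: next :: rest =>
      if next > addr then checkA d addr max_offset sym_addr
      else scanA d addr max_offset (next :: rest)

def closest_symbol (addr_to_name : List (Int × String)) (addr : Int) (max_offset : Int) : Option String × Option Int :=
  if addr_to_name = [] then (none, none)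
  else
    let d := PySem.Dict.ofList addr_to_name
    let sorted_addrs := PySem.List.sorted d.keys (fun x => x) false
    scanA d addr max_offset sorted_addrs

-- ===== PORT B =====
-- hand-rolled bisect_right of Source B; indices are Nat (Python's lo, hi, mid are
-- nonnegative throughout, and mid < hi ≤ len, so 'getD mid 0' is exactly
-- Python's in-range 'sorted_addrs[mid]').
def bisectLoopB (xs : List Int) (addr : Int) (lo hi : Nat) : Nat :=
  if lo < hi then
    let mid := (lo + hi) / 2
    if addr < xs.getD mid 0 then bisectLoopB xs addr lo mid
    else bisectLoopB xs addr (mid + 1) hi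
  else lo
termination_by hi - lo
decreasing_by all_goals omega

def closest_symbol_alt (addr_to_name : List (Int × String)) (addr : Int) (max_offset : Int) : Option String × Option Int :=
  if addr_to_name = [] then (none, none)
  else
    let d := PySem.Dict.ofList addr_to_name
    let sorted_addrs := PySem.List.sorted d.keys (fun x => x) false
    let lo := bisectLoopB sorted_addrs addr 0 sorted_addrs.length
    if lo = 0 then (none, none)
    else
      let sym_addr := sorted_addrs.getD (lo - 1) 0
      let off := addr - sym_addr
      if off ≤ max_offset then (d.get? sym_addr, some off) else (none, none)

-- ===== PRECONDITION & SPEC =====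
def Spec_closest_symbol (addr_to_name : List (Int × String)) (addr : Int) (max_offset : Int) (out : Option String × Option Int) : Prop := out = closest_symbol_alt addr_to_name addr max_offset
instance (addr_to_name : List (Int × String)) (addr : Int) (max_offset : Int) (out : Option String × Option Int) : Decidable (Spec_closest_symbol addr_to_name addr max_offset out) := by unfold Spec_closest_symbol; infer_instance

-- ===== CLAIM (what is proved, stated in full; the proofs are below) =====
def Claim_equal_closest_symbol : Prop := ∀ (addr_to_name : List (Int × String)) (addr : Int) (max_offset : Int), Dom_closest_symbol addr_to_name addr max_offset → Spec_closest_symbol addr_to_name addr max_offset (closest_symbol addr_to_name addr max_offset)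

-- ===== LEMMAS AND PROOFS =====

-- bisectLoopB on a (weakly) sorted list computes a bisect_right point:
-- everything strictly before the result is <= addr, everything from it on is > addr.
theorem bisectLoopB_spec (xs : List Int) (addr : Int)
    (hmono : ∀ p q : Nat, p ≤ q → q < xs.length → xs.getD p 0 ≤ xs.getD q 0) :
    ∀ n lo hi, hi - lo ≤ n → lo ≤ hi → hi ≤ xs.length →
      (∀ j, j < lo → xs.getD j 0 ≤ addr) →
      (∀ j, hi ≤ j → j < xs.length → addr < xs.getD j 0) →
      lo ≤ bisectLoopB xs addr lo hi ∧ bisectLoopB xs addr lo hi ≤ hi ∧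
      (∀ j, j < bisectLoopB xs addr lo hi → xs.getD j 0 ≤ addr) ∧
      (∀ j, bisectLoopB xs addr lo hi ≤ j → j < xs.length → addr < xs.getD j 0) := by
  intro n
  induction n with
  | zero =>
    intro lo hi hle hlohi hhi h1 h2
    have hnlt : ¬ lo < hi := by omega
    rw [bisectLoopB]
    simp only [hnlt, if_false]
    exact ⟨le_refl _, hlohi, h1, fun j hj hjl => h2 j (by omega) hjl⟩
  | succ n ih =>
    intro lo hi hle hlohi hhi h1 h2
    by_cases hlt : lo < hi
    · rw [bisectLoopB]
      simp only [hlt, if_true]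
      have hmid1 : lo ≤ (lo + hi) / 2 := by omega
      have hmid2 : (lo + hi) / 2 < hi := by omega
      by_cases hc : addr < xs.getD ((lo + hi) / 2) 0
      · simp only [hc, if_true]
        have hres := ih lo ((lo + hi) / 2) (by omega) hmid1 (by omega) h1
          (fun j hj hjl => lt_of_lt_of_le hc (hmono _ j hj hjl))
        exact ⟨hres.1, by omega, hres.2.2⟩
      · simp only [hc, if_false]
        rw [not_lt] at hc
        have h1' : ∀ j, j < (lo + hi) / 2 + 1 → xs.getD j 0 ≤ addr := by
          intro j hj
          exact le_trans (hmono j _ (by omega) (by omega)) hc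
        have hres := ih ((lo + hi) / 2 + 1) hi (by omega) (by omega) hhi h1' h2
        exact ⟨by omega, hres.2.1, hres.2.2⟩
    · rw [bisectLoopB]
      simp only [hlt, if_false]
      exact ⟨le_refl _, hlohi, h1, fun j hj hjl => h2 j (by omega) hjl⟩

-- A's scan, characterised by any bisect_right point r for the list it scans.
theorem scanA_eq (d : PySem.Dict Int String) (addr mo : Int) :
    ∀ (ks : List Int) (r : Nat), ks ≠ [] → r ≤ ks.length →
      (∀ j, j < r → ks.getD j 0 ≤ addr) →
      (∀ j, r ≤ j → j < ks.length → addr < ks.getD j 0) →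
      scanA d addr mo ks =
        (if r = 0 then (none, none)
         else
           let sym := ks.getD (r - 1) 0
           let off := addr - sym
           if off ≤ mo then (d.get? sym, some off) else (none, none)) := by
  intro ks
  induction ks with
  | nil => intro r h; exact absurd rfl h
  | cons sym rest ih =>
    intro r _ hr h1 h2
    cases rest with
    | nil =>
      simp only [List.length_cons, List.length_nil] at hr
      match r, hr with
      | 0, _ =>
        have h0 := h2 0 (by omega) (by simp)
        simp only [List.getD_cons_zero] at h0
        simp only [scanA, checkA]
        rw [if_neg (show ¬(0 ≤ addr - sym ∧ addr - sym ≤ mo) by omega), if_pos trivial]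
      | 1, _ =>
        have h0 := h1 0 (by omega)
        simp only [List.getD_cons_zero] at h0
        simp only [scanA, checkA]
        rw [if_neg (by omega : ¬(1 : Nat) = 0)]
        simp only [Nat.sub_self, List.getD_cons_zero]
        by_cases hoff : addr - sym ≤ mo
        · rw [if_pos ⟨by omega, hoff⟩, if_pos hoff]
        · rw [if_neg (fun hcon => hoff hcon.2), if_neg hoff]
    | cons next rest2 =>
      by_cases hnext : next > addr
      · have hr1 : r ≤ 1 := by
          by_contra hcon
          have := h1 1 (by omega)
          simp only [List.getD_cons_succ, List.getD_cons_zero] at this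
          omega
        simp only [scanA, checkA, if_pos hnext]
        match r, hr1 with
        | 0, _ =>
          have h0 := h2 0 (by omega) (by simp)
          simp only [List.getD_cons_zero] at h0
          rw [if_neg (show ¬(0 ≤ addr - sym ∧ addr - sym ≤ mo) by omega), if_pos rfl]
        | 1, _ =>
          have h0 := h1 0 (by omega)
          simp only [List.getD_cons_zero] at h0
          rw [if_neg (by omega : ¬(1 : Nat) = 0)]
          simp only [Nat.sub_self, List.getD_cons_zero]
          by_cases hoff : addr - sym ≤ mo
          · rw [if_pos ⟨by omega, hoff⟩, if_pos hoff]
          · rw [if_neg (fun hcon => hoff hcon.2), if_neg hoff]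
      · have hr2 : 2 ≤ r := by
          by_contra hcon
          have := h2 1 (by omega) (by simp)
          simp only [List.getD_cons_succ, List.getD_cons_zero] at this
          omega
        obtain ⟨m, rfl⟩ : ∃ m, r = m + 2 := ⟨r - 2, by omega⟩
        simp only [scanA, if_neg hnext]
        have hlen := hr
        simp only [List.length_cons] at hlen
        have hrec := ih (m + 1) (by simp) (by simp only [List.length_cons]; omega)
          (fun j hj => by
            have := h1 (j + 1) (by omega)
            simpa using this)
          (fun j hj hjl => by
            have := h2 (j + 1) (by omega)
              (by simp only [List.length_cons] at hjl ⊢; omega)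
            simpa using this)
        rw [hrec]
        rw [if_neg (by omega : ¬ m + 1 = 0), if_neg (by omega : ¬ m + 2 = 0)]
        simp only [show m + 2 - 1 = m + 1 from rfl, show m + 1 - 1 = m from rfl,
          List.getD_cons_succ]

-- ===== VERDICT (by name: the statement is the Claim_ definition above) =====
theorem closest_symbol_spec : Claim_equal_closest_symbol := by
  unfold Claim_equal_closest_symbol
  intro l addr mo _
  unfold Spec_closest_symbol
  by_cases hnil : l = []
  · rw [closest_symbol, closest_symbol_alt, if_pos hnil, if_pos hnil]
  · rw [closest_symbol, closest_symbol_alt, if_neg hnil, if_neg hnil]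
    set d := PySem.Dict.ofList l with hd
    set ks := PySem.List.sorted d.keys (fun x => x) false with hks
    have hkne : ks ≠ [] := by
      rw [hks, Ne, PySem.List.sorted_eq_nil_iff]
      intro hkeys
      obtain ⟨p, l', rfl⟩ := List.exists_cons_of_ne_nil hnil
      have hp : p.1 ∈ d.keys := by
        rw [hd]
        show p.1 ∈ ((p :: l').foldl (fun acc q => acc.insert q.1 q.2) PySem.Dict.empty).keys
        rw [PySem.Dict.keys_foldl_insert_key (p :: l') (fun x => x.1)
          (fun _ x => x.2) PySem.Dict.empty]
        rw [PySem.Set.mem_update]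
        right
        exact List.mem_map_of_mem (List.mem_cons_self ..)
      rw [hkeys] at hp
      exact absurd hp (List.not_mem_nil)
    have hmono : ∀ p q : Nat, p ≤ q → q < ks.length → ks.getD p 0 ≤ ks.getD q 0 := by
      intro p q hpq hq
      rw [List.getD_eq_getElem _ _ (lt_of_le_of_lt hpq hq), List.getD_eq_getElem _ _ hq]
      exact PySem.List.sorted_id_getElem_mono d.keys hpq (hks ▸ hq)
    obtain ⟨_, hle, hA, hB⟩ := bisectLoopB_spec ks addr hmono ks.length 0 ks.length
      (by omega) (by omega) le_rfl
      (fun j hj => absurd hj (Nat.not_lt_zero j))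
      (fun j hj hjl => absurd hjl (by omega))
    rw [scanA_eq d addr mo ks (bisectLoopB ks addr 0 ks.length) hkne hle hA hB]
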